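-- pv_equiv track=rewrite | github.com/SerSurguchev/ConeDetection | Cone_color_detection/Cone_color_detect.py | point_into_rectangle
-- ===== SOURCE A (Python) =====
-- def point_into_rectangle(boxes, x, y):
--     """
--     :param boxes: (list of lists): Coordinates of all boxes on image
--     :param x: (int): x point coordinate
--     :param y: (int): y point coordinate
--     :return: (boolean): True if point into other bounding box else False
--     """
--
--     def product(Ax, Ay,
--                 Bx, By,
--                 Px, Py):
--         return (Bx - Ax) * (Py - Ay) - (By - Ay) * (Px - Ax)
--
--     check = False
--     # x, y, w, h
--     for box in boxes:
--         p1 = product(box[0], box[1], box[0], box[1] + box[3], x, y)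
--         p2 = product(box[0], box[1] + box[3], box[0] + box[2], box[1] + box[3], x, y)
--         p3 = product(box[0] + box[2], box[1] + box[3], box[0] + box[2], box[1], x, y)
--         p4 = product(box[0] + box[2], box[1], box[0], box[1], x, y)
--
--         # point into rectangle or not
--         if ((p1 < 0 and p2 < 0 and p3 < 0 and p4 < 0) or
--                 (p1 > 0 and p2 > 0 and p3 > 0 and p4 > 0)):
--             check = True
--             break
--
--     return check
-- ===== SOURCE B (Python) =====
-- def point_into_rectangle(boxes, x, y):
--     for box in boxes:
--         x0, y0, w, h = box[0], box[1], box[2], box[3]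
--         if (x - x0) * (x - (x0 + w)) < 0 and (y - y0) * (y - (y0 + h)) < 0:
--             return True
--     return False
-- ===== Notes on version B (the rewrite author's own statement) =====
-- stated objective: simpler
-- what changed: Replaces the four cross-product half-plane tests per box by a direct product-of-differences interval test (x-x0)*(x-x0-w)<0 and (y-y0)*(y-y0-h)<0, which is algebraically equivalent to A's same-sign condition including negative/zero w,h.
import Mathlib
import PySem

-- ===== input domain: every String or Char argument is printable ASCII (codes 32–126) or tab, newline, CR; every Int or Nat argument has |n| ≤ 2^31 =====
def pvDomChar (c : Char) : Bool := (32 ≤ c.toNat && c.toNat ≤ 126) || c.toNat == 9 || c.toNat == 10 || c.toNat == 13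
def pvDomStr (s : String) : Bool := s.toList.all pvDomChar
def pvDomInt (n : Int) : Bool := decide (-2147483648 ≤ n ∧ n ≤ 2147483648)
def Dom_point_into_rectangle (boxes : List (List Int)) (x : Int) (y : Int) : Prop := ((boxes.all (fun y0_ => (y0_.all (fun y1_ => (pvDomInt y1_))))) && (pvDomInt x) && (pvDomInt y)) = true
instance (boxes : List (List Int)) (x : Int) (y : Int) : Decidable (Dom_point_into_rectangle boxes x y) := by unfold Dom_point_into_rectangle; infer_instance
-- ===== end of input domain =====

-- B replaces A's four cross-product half-plane sign tests per box by one direct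
-- product-of-differences interval test (simpler; same behaviour, incl. negative/zero w,h).

-- ===== PORT A =====
-- the inner helper 'product' of A
def pirProduct (Ax Ay Bx By Px Py : Int) : Int :=
  (Bx - Ax) * (Py - Ay) - (By - Ay) * (Px - Ax)

-- for-loop with break → structural recursion; box[i] → pyGetD (Pre_ keeps indices in range)
def point_into_rectangle (boxes : List (List Int)) (x : Int) (y : Int) : Bool :=
  match boxes with
  | [] => false
  | box :: rest =>
    let b0 := PySem.List.pyGetD box 0 0
    let b1 := PySem.List.pyGetD box 1 0
    let b2 := PySem.List.pyGetD box 2 0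
    let b3 := PySem.List.pyGetD box 3 0
    let p1 := pirProduct b0 b1 b0 (b1 + b3) x y
    let p2 := pirProduct b0 (b1 + b3) (b0 + b2) (b1 + b3) x y
    let p3 := pirProduct (b0 + b2) (b1 + b3) (b0 + b2) b1 x y
    let p4 := pirProduct (b0 + b2) b1 b0 b1 x y
    if (p1 < 0 && p2 < 0 && p3 < 0 && p4 < 0) || (p1 > 0 && p2 > 0 && p3 > 0 && p4 > 0) then
      true
    else
      point_into_rectangle rest x y

-- ===== PORT B =====
def point_into_rectangle_alt (boxes : List (List Int)) (x : Int) (y : Int) : Bool :=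
  match boxes with
  | [] => false
  | box :: rest =>
    let x0 := PySem.List.pyGetD box 0 0
    let y0 := PySem.List.pyGetD box 1 0
    let w := PySem.List.pyGetD box 2 0
    let h := PySem.List.pyGetD box 3 0
    if (x - x0) * (x - (x0 + w)) < 0 && (y - y0) * (y - (y0 + h)) < 0 then
      true
    else
      point_into_rectangle_alt rest x y

-- ===== PRECONDITION & SPEC =====
-- A (and B) raise IndexError on any box with fewer than 4 entries; Pre_ excludes exactly those.
def Pre_point_into_rectangle (boxes : List (List Int)) (x : Int) (y : Int) : Prop :=
  ∀ box ∈ boxes, 4 ≤ box.length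
instance (boxes : List (List Int)) (x : Int) (y : Int) : Decidable (Pre_point_into_rectangle boxes x y) := by unfold Pre_point_into_rectangle; infer_instance

def pvWitness_point_into_rectangle : List (List Int) × Int × Int := ([[0, 0, 4, 3], [10, 10, 2, 2]], 1, 1)

def Spec_point_into_rectangle (boxes : List (List Int)) (x : Int) (y : Int) (out : Bool) : Prop := out = point_into_rectangle_alt boxes x y
instance (boxes : List (List Int)) (x : Int) (y : Int) (out : Bool) : Decidable (Spec_point_into_rectangle boxes x y out) := by unfold Spec_point_into_rectangle; infer_instance

-- ===== CLAIM (what is proved, stated in full; the proofs are below) =====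
def Claim_equal_point_into_rectangle : Prop := ∀ (boxes : List (List Int)) (x : Int) (y : Int), Dom_point_into_rectangle boxes x y → Pre_point_into_rectangle boxes x y → Spec_point_into_rectangle boxes x y (point_into_rectangle boxes x y)

-- ===== LEMMAS AND PROOFS =====

-- the per-box conditions agree for ALL integer corner data (no positivity of w,h needed)
theorem pir_box_cond_iff (x0 y0 w h x y : Int) :
    ((pirProduct x0 y0 x0 (y0 + h) x y < 0 ∧ pirProduct x0 (y0 + h) (x0 + w) (y0 + h) x y < 0 ∧
      pirProduct (x0 + w) (y0 + h) (x0 + w) y0 x y < 0 ∧ pirProduct (x0 + w) y0 x0 y0 x y < 0) ∨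
     (pirProduct x0 y0 x0 (y0 + h) x y > 0 ∧ pirProduct x0 (y0 + h) (x0 + w) (y0 + h) x y > 0 ∧
      pirProduct (x0 + w) (y0 + h) (x0 + w) y0 x y > 0 ∧ pirProduct (x0 + w) y0 x0 y0 x y > 0)) ↔
    ((x - x0) * (x - (x0 + w)) < 0 ∧ (y - y0) * (y - (y0 + h)) < 0) := by
  simp only [pirProduct]
  constructor
  · rintro (⟨h1, h2, h3, h4⟩ | ⟨h1, h2, h3, h4⟩)
    · exact ⟨by nlinarith [mul_pos_of_neg_of_neg h1 h3, sq_nonneg h],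
             by nlinarith [mul_pos_of_neg_of_neg h2 h4, sq_nonneg w]⟩
    · exact ⟨by nlinarith [mul_pos h1 h3, sq_nonneg h],
             by nlinarith [mul_pos h2 h4, sq_nonneg w]⟩
  · rintro ⟨hx, hy⟩
    rcases mul_neg_iff.mp hx with ⟨ha, hb⟩ | ⟨ha, hb⟩ <;>
      rcases mul_neg_iff.mp hy with ⟨hc, hd⟩ | ⟨hc, hd⟩
    · left; exact ⟨by nlinarith, by nlinarith, by nlinarith, by nlinarith⟩
    · right; exact ⟨by nlinarith, by nlinarith, by nlinarith, by nlinarith⟩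
    · right; exact ⟨by nlinarith, by nlinarith, by nlinarith, by nlinarith⟩
    · left; exact ⟨by nlinarith, by nlinarith, by nlinarith, by nlinarith⟩

-- ===== VERDICT (by name: the statement is the Claim_ definition above) =====
theorem point_into_rectangle_spec : Claim_equal_point_into_rectangle := by
  intro boxes x y hD hP
  clear hD hP
  unfold Spec_point_into_rectangle
  induction boxes with
  | nil => rfl
  | cons box rest ih =>
    simp only [point_into_rectangle, point_into_rectangle_alt]
    rw [ih]
    congr 1
    refine propext ?_
    simp only [Bool.or_eq_true, Bool.and_eq_true, decide_eq_true_eq, and_assoc]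
    exact pir_box_cond_iff _ _ _ _ x y
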